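-- pv_equiv track=rewrite | github.com/KLEF-ompg-ECE/simulated-annealing-sowmyyaaa | sa_timetable.py | count_clashes_weighted
-- ===== SOURCE A (Python) =====
-- STUDENTS = [
--     [0,1,5],[0,2,6],[1,3,7],[2,4,8],[3,5,9],
--     [0,4,7],[1,6,8],[2,5,9],[3,6,0],[4,7,1],
--     [5,8,2],[6,9,3],[7,0,4],[8,1,5],[9,2,6],
--     [0,3,8],[1,4,9],[2,7,5],[3,8,6],[4,9,7],
--     [0,5,2],[1,6,3],[2,7,4],[3,8,0],[4,9,1],
--     [5,0,6],[6,1,7],[7,2,8],[8,3,9],[9,4,0],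
-- ]
--
-- def count_clashes_weighted(timetable):
--     """
--     EXPERIMENT 3 — Weighted objective function.
--
--     Instead of counting every clash equally, this version penalises
--     a student having ALL THREE exams in the same slot much more heavily:
--         • 2 exams in same slot  → counts as 1
--         • 3 exams in same slot  → counts as 5  (much worse!)
--
--     This guides SA to fix the worst clashes first.
--     """
--     clashes = 0
--     for student_exams in STUDENTS:
--         slot_count = {}
--         for exam in student_exams:
--             s = timetable[exam]
--             slot_count[s] = slot_count.get(s, 0) + 1
--         for count in slot_count.values():
--             if count == 2:
--                 clashes += 1
--             elif count >= 3:
--                 clashes += 5   # heavy penalty for triple clash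
--     return clashes
-- ===== SOURCE B (Python) =====
-- # Weighted clash count via precomputed pair/triple tables:
-- # score = (# exam pairs sharing a slot) + 2 * (# students with all three in one slot),
-- # since a triple clash contains 3 coinciding pairs and must score 5 = 3 + 2.
--
-- # The 3 unordered exam pairs of each student, flattened (90 pairs).
-- PAIRS = [
--     (0, 1), (0, 5), (1, 5), (0, 2), (0, 6), (2, 6), (1, 3), (1, 7), (3, 7),
--     (2, 4), (2, 8), (4, 8), (3, 5), (3, 9), (5, 9), (0, 4), (0, 7), (4, 7),
--     (1, 6), (1, 8), (6, 8), (2, 5), (2, 9), (5, 9), (3, 6), (3, 0), (6, 0),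
--     (4, 7), (4, 1), (7, 1), (5, 8), (5, 2), (8, 2), (6, 9), (6, 3), (9, 3),
--     (7, 0), (7, 4), (0, 4), (8, 1), (8, 5), (1, 5), (9, 2), (9, 6), (2, 6),
--     (0, 3), (0, 8), (3, 8), (1, 4), (1, 9), (4, 9), (2, 7), (2, 5), (7, 5),
--     (3, 8), (3, 6), (8, 6), (4, 9), (4, 7), (9, 7), (0, 5), (0, 2), (5, 2),
--     (1, 6), (1, 3), (6, 3), (2, 7), (2, 4), (7, 4), (3, 8), (3, 0), (8, 0),
--     (4, 9), (4, 1), (9, 1), (5, 0), (5, 6), (0, 6), (6, 1), (6, 7), (1, 7),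
--     (7, 2), (7, 8), (2, 8), (8, 3), (8, 9), (3, 9), (9, 4), (9, 0), (4, 0),
-- ]
--
-- # Each student's exam triple (30 triples).
-- TRIPLES = [
--     (0, 1, 5), (0, 2, 6), (1, 3, 7), (2, 4, 8), (3, 5, 9), (0, 4, 7),
--     (1, 6, 8), (2, 5, 9), (3, 6, 0), (4, 7, 1), (5, 8, 2), (6, 9, 3),
--     (7, 0, 4), (8, 1, 5), (9, 2, 6), (0, 3, 8), (1, 4, 9), (2, 7, 5),
--     (3, 8, 6), (4, 9, 7), (0, 5, 2), (1, 6, 3), (2, 7, 4), (3, 8, 0),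
--     (4, 9, 1), (5, 0, 6), (6, 1, 7), (7, 2, 8), (8, 3, 9), (9, 4, 0),
-- ]
--
-- def count_clashes_weighted(timetable):
--     pair_hits = sum(1 for (i, j) in PAIRS if timetable[i] == timetable[j])
--     triple_hits = sum(1 for (a, b, c) in TRIPLES
--                       if timetable[a] == timetable[b] == timetable[c])
--     return pair_hits + 2 * triple_hits
-- ===== Notes on version B (the rewrite author's own statement) =====
-- stated objective: alternative
-- what changed: Replaced the per-student slot-count dictionary and the scan over its values by two staged counts over precomputed constant tables: the number of exam pairs landing in the same slot plus twice the number of students whose three exams all share a slot (a triple clash has 3 coinciding pairs and must score 5 = 3 + 2).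
import Mathlib
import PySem

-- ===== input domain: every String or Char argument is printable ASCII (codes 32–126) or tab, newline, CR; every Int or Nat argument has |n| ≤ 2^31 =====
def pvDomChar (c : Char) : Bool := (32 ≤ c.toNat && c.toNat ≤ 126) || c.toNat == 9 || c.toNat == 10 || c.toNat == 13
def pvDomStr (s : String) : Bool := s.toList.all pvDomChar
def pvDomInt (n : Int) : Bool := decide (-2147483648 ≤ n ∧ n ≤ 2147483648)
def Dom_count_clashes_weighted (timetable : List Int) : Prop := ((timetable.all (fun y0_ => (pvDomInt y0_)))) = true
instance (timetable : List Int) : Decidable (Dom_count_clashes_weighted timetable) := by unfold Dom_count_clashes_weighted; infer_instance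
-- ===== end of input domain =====

-- B counts coinciding exam pairs and all-three-coincide triples over precomputed PAIRS/TRIPLES
-- tables (score = pair hits + 2 * triple hits) instead of A's per-student slot-count dictionary: simpler, same cost.


-- ===== PORT A =====
def STUDENTS : List (List Int) := [
    [0,1,5],[0,2,6],[1,3,7],[2,4,8],[3,5,9],
    [0,4,7],[1,6,8],[2,5,9],[3,6,0],[4,7,1],
    [5,8,2],[6,9,3],[7,0,4],[8,1,5],[9,2,6],
    [0,3,8],[1,4,9],[2,7,5],[3,8,6],[4,9,7],
    [0,5,2],[1,6,3],[2,7,4],[3,8,0],[4,9,1],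
    [5,0,6],[6,1,7],[7,2,8],[8,3,9],[9,4,0]]

-- timetable[exam]: exams are 0..9, so pyGetD is exact whenever 10 ≤ timetable.length (Pre_).
def count_clashes_weighted (timetable : List Int) : Int :=
  STUDENTS.foldl (fun clashes student_exams =>
    let slot_count : PySem.Dict Int Int :=
      student_exams.foldl (fun d exam =>
        let s := PySem.List.pyGetD timetable exam 0
        d.insert s (d.getD s 0 + 1)) PySem.Dict.empty
    slot_count.values.foldl (fun cl count =>
      if count == 2 then cl + 1 else if count ≥ 3 then cl + 5 else cl) clashes) 0

-- ===== PORT B =====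
-- The 3 unordered exam pairs of each student, flattened (90 pairs).
def PAIRS : List (Int × Int) := [
    (0, 1), (0, 5), (1, 5), (0, 2), (0, 6), (2, 6), (1, 3), (1, 7), (3, 7),
    (2, 4), (2, 8), (4, 8), (3, 5), (3, 9), (5, 9), (0, 4), (0, 7), (4, 7),
    (1, 6), (1, 8), (6, 8), (2, 5), (2, 9), (5, 9), (3, 6), (3, 0), (6, 0),
    (4, 7), (4, 1), (7, 1), (5, 8), (5, 2), (8, 2), (6, 9), (6, 3), (9, 3),
    (7, 0), (7, 4), (0, 4), (8, 1), (8, 5), (1, 5), (9, 2), (9, 6), (2, 6),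
    (0, 3), (0, 8), (3, 8), (1, 4), (1, 9), (4, 9), (2, 7), (2, 5), (7, 5),
    (3, 8), (3, 6), (8, 6), (4, 9), (4, 7), (9, 7), (0, 5), (0, 2), (5, 2),
    (1, 6), (1, 3), (6, 3), (2, 7), (2, 4), (7, 4), (3, 8), (3, 0), (8, 0),
    (4, 9), (4, 1), (9, 1), (5, 0), (5, 6), (0, 6), (6, 1), (6, 7), (1, 7),
    (7, 2), (7, 8), (2, 8), (8, 3), (8, 9), (3, 9), (9, 4), (9, 0), (4, 0)]

-- Each student's exam triple (30 triples).
def TRIPLES : List (Int × Int × Int) := [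
    (0, 1, 5), (0, 2, 6), (1, 3, 7), (2, 4, 8), (3, 5, 9), (0, 4, 7),
    (1, 6, 8), (2, 5, 9), (3, 6, 0), (4, 7, 1), (5, 8, 2), (6, 9, 3),
    (7, 0, 4), (8, 1, 5), (9, 2, 6), (0, 3, 8), (1, 4, 9), (2, 7, 5),
    (3, 8, 6), (4, 9, 7), (0, 5, 2), (1, 6, 3), (2, 7, 4), (3, 8, 0),
    (4, 9, 1), (5, 0, 6), (6, 1, 7), (7, 2, 8), (8, 3, 9), (9, 4, 0)]

def count_clashes_weighted_alt (timetable : List Int) : Int :=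
  let pair_hits := PAIRS.foldl (fun acc p =>
    if PySem.List.pyGetD timetable p.1 0 = PySem.List.pyGetD timetable p.2 0
    then acc + 1 else acc) 0
  let triple_hits := TRIPLES.foldl (fun acc tr =>
    if PySem.List.pyGetD timetable tr.1 0 = PySem.List.pyGetD timetable tr.2.1 0
       ∧ PySem.List.pyGetD timetable tr.2.1 0 = PySem.List.pyGetD timetable tr.2.2 0
    then acc + 1 else acc) 0
  pair_hits + 2 * triple_hits

-- ===== PRECONDITION & SPEC =====
-- Pre_: the exam indices are the fixed literals 0..9, so Python raises IndexError iff the timetable has fewer than 10 slots.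
def Pre_count_clashes_weighted (timetable : List Int) : Prop := 10 ≤ timetable.length
instance (timetable : List Int) : Decidable (Pre_count_clashes_weighted timetable) := by unfold Pre_count_clashes_weighted; infer_instance
def pvWitness_count_clashes_weighted : List Int := [0, 1, 0, 2, 1, 0, 3, 2, 1, 0]

def Spec_count_clashes_weighted (timetable : List Int) (out : Int) : Prop := out = count_clashes_weighted_alt timetable
instance (timetable : List Int) (out : Int) : Decidable (Spec_count_clashes_weighted timetable out) := by unfold Spec_count_clashes_weighted; infer_instance

-- ===== CLAIM (what is proved, stated in full; the proofs are below) =====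
def Claim_equal_count_clashes_weighted : Prop := ∀ (timetable : List Int), Dom_count_clashes_weighted timetable → Pre_count_clashes_weighted timetable → Spec_count_clashes_weighted timetable (count_clashes_weighted timetable)

-- ===== LEMMAS AND PROOFS =====

-- proof-only abbreviations
def pvQ (st : List Int) (i : Int) : Int := PySem.List.pyGetD st i 0
def pvPairInd (t : List Int) (p : Int × Int) : Int :=
  if PySem.List.pyGetD t p.1 0 = PySem.List.pyGetD t p.2 0 then 1 else 0
def pvTriInd (t : List Int) (tr : Int × Int × Int) : Int :=
  if PySem.List.pyGetD t tr.1 0 = PySem.List.pyGetD t tr.2.1 0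
     ∧ PySem.List.pyGetD t tr.2.1 0 = PySem.List.pyGetD t tr.2.2 0 then 1 else 0
def pvPairsOf (st : List Int) : List (Int × Int) :=
  [(pvQ st 0, pvQ st 1), (pvQ st 0, pvQ st 2), (pvQ st 1, pvQ st 2)]
def pvTripleOf (st : List Int) : Int × Int × Int := (pvQ st 0, pvQ st 1, pvQ st 2)
-- per-student weight in pair/triple form
def pvAdd (t : List Int) (st : List Int) : Int :=
  ((pvPairsOf st).map (pvPairInd t)).sum + 2 * pvTriInd t (pvTripleOf st)

lemma pairs_eq : PAIRS = STUDENTS.flatMap pvPairsOf := by decide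
lemma triples_eq : TRIPLES = STUDENTS.map pvTripleOf := by decide

lemma pair_fold (t : List Int) :
    ∀ (l : List (Int × Int)) (a : Int),
      l.foldl (fun acc p => if PySem.List.pyGetD t p.1 0 = PySem.List.pyGetD t p.2 0
          then acc + 1 else acc) a
        = a + (l.map (pvPairInd t)).sum := by
  intro l
  induction l with
  | nil => intro a; simp
  | cons x xs ih => intro a
                    simp only [List.foldl_cons, List.map_cons, List.sum_cons, ih, pvPairInd]
                    split_ifs <;> ring

lemma triple_fold (t : List Int) :
    ∀ (l : List (Int × Int × Int)) (a : Int),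
      l.foldl (fun acc tr => if PySem.List.pyGetD t tr.1 0 = PySem.List.pyGetD t tr.2.1 0
          ∧ PySem.List.pyGetD t tr.2.1 0 = PySem.List.pyGetD t tr.2.2 0
          then acc + 1 else acc) a
        = a + (l.map (pvTriInd t)).sum := by
  intro l
  induction l with
  | nil => intro a; simp
  | cons x xs ih => intro a
                    simp only [List.foldl_cons, List.map_cons, List.sum_cons, ih, pvTriInd]
                    split_ifs <;> ring

lemma sum_flatMap' {α β : Type} (h : α → List β) (f : β → Int) :
    ∀ l : List α, ((l.flatMap h).map f).sum = (l.map (fun x => ((h x).map f).sum)).sum := by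
  intro l
  induction l with
  | nil => simp
  | cons x xs ih => simp [List.flatMap_cons, ih]

lemma sum_combine {α : Type} (f g : α → Int) :
    ∀ l : List α, (l.map f).sum + 2 * (l.map g).sum = (l.map (fun x => f x + 2 * g x)).sum := by
  intro l
  induction l with
  | nil => simp
  | cons x xs ih => simp only [List.map_cons, List.sum_cons]; rw [← ih]; ring

-- One student with slots a, b, c: A's dict-of-counts weight equals pair-hits + 2·triple-hit.
lemma student_weight_eq (a b c cl : Int) :
    (([a, b, c].foldl (fun d s => d.insert s (d.getD s 0 + 1))
        (PySem.Dict.empty : PySem.Dict Int Int)).values).foldl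
      (fun cl count => if count == 2 then cl + 1 else if count ≥ 3 then cl + 5 else cl) cl
    = cl + ((if a = b then (1:Int) else 0) + (if a = c then (1:Int) else 0)
            + (if b = c then (1:Int) else 0) + 2 * (if a = b ∧ b = c then (1:Int) else 0)) := by
  rw [PySem.Dict.foldl_insert_getD_add_one_eq_counter]
  by_cases h1 : b = a <;> by_cases h2 : c = a <;> by_cases h3 : c = b <;>
    simp [PySem.Dict.values, PySem.Dict.items_counter, PySem.Set.ofList, PySem.Set.add,
      List.count_cons, h1, h2, h3, @eq_comm _ a b, @eq_comm _ a c, @eq_comm _ b c]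

-- Every student list in STUDENTS has exactly 3 elements, so A's inner loops compute pvAdd.
lemma step_eq (timetable : List Int) (cl : Int) (st : List Int) (hst : st ∈ STUDENTS) :
    ((st.foldl (fun d exam =>
        let s := PySem.List.pyGetD timetable exam 0
        d.insert s (d.getD s 0 + 1)) (PySem.Dict.empty : PySem.Dict Int Int)).values).foldl
      (fun cl count => if count == 2 then cl + 1 else if count ≥ 3 then cl + 5 else cl) cl
    = cl + pvAdd timetable st := by
  have hlen : st.length = 3 := by
    have h3 : STUDENTS.all (fun s => s.length == 3) = true := by decide
    simpa using List.all_eq_true.mp h3 st hst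
  rcases st with _ | ⟨x, _ | ⟨y, _ | ⟨z, _ | _⟩⟩⟩ <;> simp_all
  have := student_weight_eq (PySem.List.pyGetD timetable x 0) (PySem.List.pyGetD timetable y 0)
      (PySem.List.pyGetD timetable z 0) cl
  simpa [pvAdd, pvPairsOf, pvTripleOf, pvPairInd, pvTriInd, pvQ, add_assoc,
    PySem.List.pyGetD, PySem.List.pyGet?, PySem.List.pyIdx?] using this

-- ===== VERDICT (by name: the statement is the Claim_ definition above) =====
theorem count_clashes_weighted_spec : Claim_equal_count_clashes_weighted := by
  intro timetable _ _
  unfold Spec_count_clashes_weighted count_clashes_weighted count_clashes_weighted_alt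
  rw [PySem.List.foldl_congr_mem _ _ (fun cl st => cl + pvAdd timetable st) 0
        (fun cl st hst => step_eq timetable cl st hst),
      PySem.List.foldl_add, zero_add]
  show (STUDENTS.map (pvAdd timetable)).sum
      = PAIRS.foldl (fun acc p => if PySem.List.pyGetD timetable p.1 0 = PySem.List.pyGetD timetable p.2 0 then acc + 1 else acc) 0
        + 2 * TRIPLES.foldl (fun acc tr => if PySem.List.pyGetD timetable tr.1 0 = PySem.List.pyGetD timetable tr.2.1 0
            ∧ PySem.List.pyGetD timetable tr.2.1 0 = PySem.List.pyGetD timetable tr.2.2 0 then acc + 1 else acc) 0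
  rw [pair_fold, triple_fold, pairs_eq, triples_eq, sum_flatMap', List.map_map,
      zero_add, zero_add, sum_combine]
  rfl
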